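-- pv_equiv track=rewrite | github.com/rshttt/Implementasi-Kriptosystem-sederhana-dengan-antarmuka-GUI-berbasis-web | webcipherprojectARA.py | permutation_encrypt_letters_only
-- ===== SOURCE A (Python) =====
-- def sanitize_letters(text):
--     return ''.join([c for c in text.upper() if 'A' <= c <= 'Z'])
--
-- def permutation_encrypt_letters_only(text, perm):
--     perm = [int(x) for x in perm]
--     k = len(perm)
--     if sorted(perm) != list(range(k)):
--         raise ValueError('Permutation must be indices 0..k-1')
--     s = sanitize_letters(text)
--     while len(s) % k != 0:
--         s += 'X'
--     res = ''
--     for i in range(0, len(s), k):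
--         block = list(s[i:i+k])
--         cipher_block = [''] * k
--         for j, pi in enumerate(perm):
--             cipher_block[j] = block[pi]
--         res += ''.join(cipher_block)
--     return res
-- ===== SOURCE B (Python) =====
-- def sanitize_letters(text):
--     return ''.join([c for c in text.upper() if 'A' <= c <= 'Z'])
--
-- def permutation_encrypt_letters_only(text, perm):
--     perm = [int(x) for x in perm]
--     k = len(perm)
--     if sorted(perm) != list(range(k)):
--         raise ValueError('Permutation must be indices 0..k-1')
--     s = sanitize_letters(text)
--     s += 'X' * (-len(s) % k)
--     return ''.join(s[i - i % k + perm[i % k]] for i in range(len(s)))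
-- ===== Notes on version B (the rewrite author's own statement) =====
-- stated objective: alternative
-- what changed: The nested block loop (slice each k-block, fill a cipher_block temporary by enumerate-and-set, concatenate) is replaced by arithmetic padding (-len % k instead of a while loop) and a single flat pass that computes each output character directly by index arithmetic s[i - i%k + perm[i%k]], with no per-block list or temporary.
import Mathlib
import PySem

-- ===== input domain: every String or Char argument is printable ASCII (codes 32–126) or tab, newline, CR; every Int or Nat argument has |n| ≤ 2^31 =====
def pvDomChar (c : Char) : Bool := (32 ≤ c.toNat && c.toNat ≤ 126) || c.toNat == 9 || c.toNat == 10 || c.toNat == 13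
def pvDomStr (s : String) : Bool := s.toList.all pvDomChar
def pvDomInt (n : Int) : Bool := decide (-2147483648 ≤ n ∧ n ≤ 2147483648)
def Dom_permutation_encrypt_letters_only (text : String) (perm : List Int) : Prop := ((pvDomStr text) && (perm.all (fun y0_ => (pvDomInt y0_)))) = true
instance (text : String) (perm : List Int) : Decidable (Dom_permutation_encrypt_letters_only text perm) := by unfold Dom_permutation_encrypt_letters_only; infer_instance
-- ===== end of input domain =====

-- B replaces A's nested block loop (slice, enumerate-and-set temporary, concatenate) by arithmetic
-- padding and one flat indexed pass s[i - i%k + perm[i%k]]; equivalence proved on valid permutations.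

-- ===== PORT A =====
-- sanitize_letters: ''.join([c for c in text.upper() if 'A' <= c <= 'Z'])  (shared helper of both Pythons)
def pvSanitize (cs : List Char) : List Char :=
  (PySem.Chars.upper cs).filter (fun c => decide ('A' ≤ c) && decide (c ≤ 'Z'))

-- while len(s) % k != 0: s += 'X'   (for k = 0 Python raises ZeroDivisionError; guarded by the caller)
def pvPadX (k : Nat) (s : List Char) : List Char :=
  if h : k = 0 ∨ s.length % k = 0 then s
  else pvPadX k (s ++ ['X'])
termination_by (k - s.length % k) % k
decreasing_by
  push Not at h
  obtain ⟨hk, hm⟩ := h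
  have hk' : 0 < k := Nat.pos_of_ne_zero hk
  have hmlt : s.length % k < k := Nat.mod_lt _ hk'
  simp only [List.length_append, List.length_cons, List.length_nil, Nat.zero_add]
  have h1 : (s.length + 1) % k = (s.length % k + 1) % k := by
    conv_lhs => rw [Nat.add_mod]
    have hk2 : 1 < k := by
      rcases Nat.lt_or_ge 1 k with h | h
      · exact h
      · interval_cases k <;> omega
    rw [Nat.mod_eq_of_lt hk2]
  rw [h1]
  rcases Nat.lt_or_ge (s.length % k + 1) k with hlt | hge
  · rw [Nat.mod_eq_of_lt hlt, Nat.mod_eq_of_lt (by omega : k - (s.length % k + 1) < k),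
      Nat.mod_eq_of_lt (by omega : k - s.length % k < k)]
    omega
  · have : s.length % k + 1 = k := by omega
    rw [this, Nat.mod_self, Nat.sub_zero, Nat.mod_self,
      Nat.mod_eq_of_lt (by omega : k - s.length % k < k)]
    omega

def permutation_encrypt_letters_only (text : String) (perm : List Int) : String :=
  let perm2 := perm.map (fun x => x)           -- perm = [int(x) for x in perm]
  let k := perm2.length
  if PySem.List.sorted perm2 (fun x => x) false ≠ (List.range k).map (fun n : Nat => (n : Int)) then
    ""                                          -- Python: raise ValueError (excluded by Pre_)
  else if k = 0 then
    ""                                          -- Python: len(s) % 0 raises ZeroDivisionError (excluded by Pre_)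
  else
    let s := pvPadX k (pvSanitize text.toList)
    let res := (PySem.List.pyRange 0 (s.length : Int) (k : Int)).foldl (fun res i =>
      let block := PySem.List.slice s (some i) (some (i + (k : Int)))
      let cipher_block := (PySem.List.enumerate perm2).foldl
        (fun cb jp => PySem.List.pySetD cb jp.1 (PySem.List.pyGetD block jp.2 'A'))
        (List.replicate k ' ')                  -- [''] * k; every slot is overwritten under Pre_
      res ++ cipher_block) []
    String.ofList res

-- ===== PORT B =====
def permutation_encrypt_letters_only_alt (text : String) (perm : List Int) : String :=
  let perm2 := perm.map (fun x => x)           -- perm = [int(x) for x in perm]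
  let k := perm2.length
  if PySem.List.sorted perm2 (fun x => x) false ≠ (List.range k).map (fun n : Nat => (n : Int)) then
    ""                                          -- Python: raise ValueError (excluded by Pre_)
  else if k = 0 then
    ""                                          -- Python: -len(s) % 0 raises ZeroDivisionError (excluded by Pre_)
  else
    let s0 := pvSanitize text.toList
    let s := s0 ++ PySem.List.pyRepeat ['X'] (PySem.Int.mod (-(s0.length : Int)) (k : Int))  -- s += 'X' * (-len(s) % k)
    String.ofList ((PySem.List.pyRange 0 (s.length : Int) 1).map (fun i =>
      PySem.List.pyGetD s (i - PySem.Int.mod i (k : Int)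
        + PySem.List.pyGetD perm2 (PySem.Int.mod i (k : Int)) 0) ' '))

-- ===== PRECONDITION & SPEC =====
-- Pre_ excludes exactly the inputs where A raises: the empty permutation (ZeroDivisionError in the
-- padding while-condition) and a perm that is not a permutation of 0..k-1 (ValueError).
def Pre_permutation_encrypt_letters_only (text : String) (perm : List Int) : Prop :=
  perm ≠ [] ∧ PySem.List.sorted perm (fun x => x) false = (List.range perm.length).map (fun n : Nat => (n : Int))
instance (text : String) (perm : List Int) : Decidable (Pre_permutation_encrypt_letters_only text perm) := by unfold Pre_permutation_encrypt_letters_only; infer_instance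

def pvWitness_permutation_encrypt_letters_only : String × List Int := ("Hello, World!", [2, 0, 1])

def Spec_permutation_encrypt_letters_only (text : String) (perm : List Int) (out : String) : Prop := out = permutation_encrypt_letters_only_alt text perm
instance (text : String) (perm : List Int) (out : String) : Decidable (Spec_permutation_encrypt_letters_only text perm out) := by unfold Spec_permutation_encrypt_letters_only; infer_instance

-- ===== CLAIM (what is proved, stated in full; the proofs are below) =====
def Claim_equal_permutation_encrypt_letters_only : Prop := ∀ (text : String) (perm : List Int), Dom_permutation_encrypt_letters_only text perm → Pre_permutation_encrypt_letters_only text perm → Spec_permutation_encrypt_letters_only text perm (permutation_encrypt_letters_only text perm)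

-- ===== LEMMAS AND PROOFS =====

-- the common normal form both ports are reduced to: block b, slot r ↦ t[k*b + perm[r]]
def pvCore (t : List Char) (perm : List Int) (k q : Nat) : List Char :=
  (List.range q).flatMap (fun b => (List.range k).map (fun r => t.getD (k * b + (perm.getD r 0).toNat) ' '))

-- the padded sanitized text both ports build
def pvPadded (text : String) (k : Nat) : List Char :=
  pvSanitize text.toList ++ List.replicate ((k - (pvSanitize text.toList).length % k) % k) 'X'

lemma pvPadX_eq (k : Nat) (hk : 0 < k) : ∀ (s : List Char),
    pvPadX k s = s ++ List.replicate ((k - s.length % k) % k) 'X' := by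
  intro s
  induction s using pvPadX.induct k with
  | case1 s h =>
    rw [pvPadX, dif_pos h]
    rcases h with h | h
    · omega
    · rw [h, Nat.sub_zero, Nat.mod_self]; simp
  | case2 s h ih =>
    push Not at h
    obtain ⟨hk0, hm⟩ := h
    have hmlt : s.length % k < k := Nat.mod_lt _ hk
    rw [pvPadX, dif_neg (by push Not; exact ⟨hk0, hm⟩), ih]
    simp only [List.length_append, List.length_cons, List.length_nil, Nat.zero_add,
      List.append_assoc, List.singleton_append]
    rw [Nat.mod_eq_of_lt (by omega : k - s.length % k < k)]
    have h1 : (s.length + 1) % k = (s.length % k + 1) % k := by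
      conv_lhs => rw [Nat.add_mod]
      have hk2 : 1 < k := by
        rcases Nat.lt_or_ge 1 k with h | h
        · exact h
        · interval_cases k <;> omega
      rw [Nat.mod_eq_of_lt hk2]
    rw [h1]
    rcases Nat.lt_or_ge (s.length % k + 1) k with hlt | hge
    · rw [Nat.mod_eq_of_lt hlt, Nat.mod_eq_of_lt (by omega : k - (s.length % k + 1) < k)]
      have : k - s.length % k = (k - (s.length % k + 1)) + 1 := by omega
      rw [this, List.replicate_succ]
    · have he : s.length % k + 1 = k := by omega
      rw [he, Nat.mod_self, Nat.sub_zero, Nat.mod_self]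
      have : k - s.length % k = 1 := by omega
      rw [this]
      simp

lemma pvNegMod (n k : Nat) (hk : 0 < k) :
    PySem.Int.mod (-(n : Int)) (k : Int) = (((k - n % k) % k : Nat) : Int) := by
  rw [PySem.Int.mod_eq_emod_of_pos (by exact_mod_cast hk), Int.neg_emod]
  by_cases hd : ((k : Int)) ∣ (n : Int)
  · rw [if_pos hd]
    have : n % k = 0 := by
      have := Int.natCast_dvd_natCast.mp hd
      omega
    rw [this, Nat.sub_zero, Nat.mod_self]
    simp
  · rw [if_neg hd]
    have hnd : ¬ (k ∣ n) := fun h => hd (Int.natCast_dvd_natCast.mpr h)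
    have hm0 : n % k ≠ 0 := fun h => hnd (Nat.dvd_of_mod_eq_zero h)
    have hml : n % k < k := Nat.mod_lt _ hk
    have h1 : ((n : Int)) % (k : Int) = ((n % k : Nat) : Int) := by push_cast; ring
    rw [h1, Nat.mod_eq_of_lt (by omega : k - n % k < k), Int.natAbs_natCast]
    push_cast
    omega

lemma pvFill (f : Int → Char) : ∀ (l : List Int) (j0 : Nat) (pre rest : List Char),
    pre.length = j0 → rest.length = l.length →
    (PySem.List.enumerate l (j0 : Int)).foldl
      (fun cb jp => PySem.List.pySetD cb jp.1 (f jp.2)) (pre ++ rest) = pre ++ l.map f := by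
  intro l
  induction l with
  | nil =>
    intro j0 pre rest _ hrest
    have : rest = [] := List.length_eq_zero_iff.mp (by simpa using hrest)
    subst this
    simp [PySem.List.enumerate_nil]
  | cons x l ih =>
    intro j0 pre rest hpre hrest
    cases rest with
    | nil => simp at hrest
    | cons r rest' =>
      rw [PySem.List.enumerate_cons, List.foldl_cons]
      have hset : PySem.List.pySetD (pre ++ r :: rest') ((j0 : Int)) (f x) = pre ++ f x :: rest' := by
        rw [PySem.List.pySetD_natCast, List.set_append_right _ _ (by omega), hpre]
        simp
      simp only [hset]
      have hcast : ((j0 : Int) + 1) = (((j0 + 1 : Nat)) : Int) := by push_cast; ring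
      rw [hcast]
      have := ih (j0 + 1) (pre ++ [f x]) rest' (by simp [hpre]) (by simpa using hrest)
      simpa using this

lemma pvMapRange {α β : Type} (l : List α) (d : α) (f : α → β) :
    l.map f = (List.range l.length).map (fun r => f (l.getD r d)) := by
  apply List.ext_getElem
  · simp
  · intro i h1 h2
    simp only [List.getElem_map, List.getElem_range]
    rw [List.getD_eq_getElem l d (by simpa using h1)]

lemma pvFlat {α : Type} (F : Nat → Nat → α) (k : Nat) (hk : 0 < k) : ∀ (q : Nat),
    (List.range (k * q)).map (fun j => F (j / k) (j % k)) =
      (List.range q).flatMap (fun b => (List.range k).map (fun r => F b r)) := by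
  intro q
  induction q with
  | zero => simp
  | succ q ih =>
    have : k * (q + 1) = k * q + k := by ring
    rw [this, List.range_add, List.map_append, ih, List.range_succ, List.flatMap_append]
    congr 1
    simp only [List.flatMap_singleton, List.map_map]
    apply List.map_congr_left
    intro r hr
    have hrk : r < k := List.mem_range.mp hr
    simp only [Function.comp_apply]
    rw [Nat.mul_add_div hk, Nat.div_eq_of_lt hrk, Nat.add_zero, Nat.mul_add_mod,
      Nat.mod_eq_of_lt hrk]

lemma pvPermBounds (perm : List Int)
    (hs : PySem.List.sorted perm (fun x => x) false = (List.range perm.length).map (fun n : Nat => (n : Int))) :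
    ∀ p ∈ perm, 0 ≤ p ∧ p < (perm.length : Int) := by
  intro p hp
  have hperm := PySem.List.sorted_perm perm (fun x => x) false
  rw [hs] at hperm
  have : p ∈ (List.range perm.length).map (fun n : Nat => (n : Int)) := hperm.mem_iff.mpr hp
  simp only [List.mem_map, List.mem_range] at this
  obtain ⟨r, hr, rfl⟩ := this
  exact ⟨Int.natCast_nonneg r, by exact_mod_cast hr⟩

lemma pvPaddedDvd (text : String) (k : Nat) (hk : 0 < k) : (pvPadded text k).length % k = 0 := by
  unfold pvPadded
  rw [List.length_append, List.length_replicate]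
  rcases Nat.eq_zero_or_pos ((pvSanitize text.toList).length % k) with h | h
  · rw [h, Nat.sub_zero, Nat.mod_self, Nat.add_zero, h]
  · have hmlt : (pvSanitize text.toList).length % k < k := Nat.mod_lt _ hk
    rw [Nat.mod_eq_of_lt (by omega : k - (pvSanitize text.toList).length % k < k)]
    have hdm := Nat.div_add_mod (pvSanitize text.toList).length k
    have hmul : k * ((pvSanitize text.toList).length / k + 1)
        = k * ((pvSanitize text.toList).length / k) + k := by ring
    have : (pvSanitize text.toList).length + (k - (pvSanitize text.toList).length % k)
        = k * ((pvSanitize text.toList).length / k + 1) := by omega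
    rw [this, Nat.mul_mod_right]

-- A's port reduced to the normal form
lemma pvPortA (text : String) (perm : List Int) (hne : perm ≠ [])
    (hs : PySem.List.sorted perm (fun x => x) false = (List.range perm.length).map (fun n : Nat => (n : Int))) :
    permutation_encrypt_letters_only text perm =
      String.ofList (pvCore (pvPadded text perm.length) perm perm.length
        ((pvPadded text perm.length).length / perm.length)) := by
  have hk : 0 < perm.length := List.length_pos_iff.mpr hne
  set k := perm.length with hkdef
  set t := pvPadded text k with htdef
  have hdvd : k ∣ t.length := Nat.dvd_of_mod_eq_zero (pvPaddedDvd text k hk)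
  set q := t.length / k with hqdef
  have hn : t.length = k * q := (Nat.mul_div_cancel' hdvd).symm
  have hbound := pvPermBounds perm hs
  unfold permutation_encrypt_letters_only
  simp only [List.map_id']
  rw [if_neg (fun hcon => hcon hs), if_neg (by omega)]
  rw [pvPadX_eq k hk, ← pvPadded, ← htdef]
  congr 1
  -- replace the inner enumerate/set fold by a map over perm (pvFill)
  rw [PySem.List.foldl_congr_mem _ _
      (fun res i => res ++ perm.map (fun p =>
        PySem.List.pyGetD (PySem.List.slice t (some i) (some (i + (k : Int)))) p 'A')) _
      (by
        intro acc i _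
        have h0 : ((0 : Int)) = ((0 : Nat) : Int) := by norm_num
        have := pvFill (fun p => PySem.List.pyGetD
            (PySem.List.slice t (some i) (some (i + (k : Int)))) p 'A') perm 0
            [] (List.replicate k ' ') rfl (by simp [hkdef])
        simp only [List.nil_append] at this
        rw [h0, this])]
  rw [PySem.List.foldl_append_eq_flatMap, List.nil_append]
  -- the stepped range is q block starts
  rw [PySem.List.pyRange_of_pos _ _ (by exact_mod_cast hk)]
  have hcount : (if (0 : Int) < (t.length : Int) then
      (((t.length : Int) - 0 + (k : Int) - 1) / (k : Int)).toNat else 0) = q := by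
    rcases Nat.eq_zero_or_pos t.length with h0 | h0
    · rw [if_neg (by simp [h0]), hqdef, h0, Nat.zero_div]
    · rw [if_pos (by exact_mod_cast h0)]
      have h2 : ((t.length : Int) - 0 + (k : Int) - 1) = ((t.length + (k - 1) : Nat) : Int) := by
        push_cast; omega
      rw [h2]
      have h3 : (((t.length + (k - 1) : Nat) : Int) / ((k : Nat) : Int)).toNat
          = (t.length + (k - 1)) / k := rfl
      rw [h3, hn, Nat.mul_add_div hk, Nat.div_eq_of_lt (by omega), Nat.add_zero, hqdef, hn,
        Nat.mul_div_cancel_left q hk]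
  rw [hcount, List.flatMap_map]
  unfold pvCore
  apply List.flatMap_congr
  intro b hb
  have hbq : b < q := List.mem_range.mp hb
  have hble : k * b + k ≤ t.length := by
    have h1 : k * (b + 1) ≤ k * q := Nat.mul_le_mul_left k hbq
    have h2 : k * (b + 1) = k * b + k := by ring
    omega
  have hcast : ((0 : Int) + (k : Int) * (b : Int)) = ((k * b : Nat) : Int) := by push_cast; ring
  rw [hcast, PySem.List.slice_natCast_add]
  have hblen : ((t.drop (k * b)).take k).length = k := by
    rw [List.length_take, List.length_drop]
    omega
  rw [pvMapRange perm 0, ← hkdef]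
  apply List.map_congr_left
  intro r hr
  have hrk : r < perm.length := List.mem_range.mp hr
  have hpmem : perm.getD r 0 ∈ perm := by
    rw [List.getD_eq_getElem perm 0 hrk]
    exact List.getElem_mem hrk
  obtain ⟨hp0, hpk⟩ := hbound _ hpmem
  have hptn : (perm.getD r 0).toNat < k := by omega
  rw [PySem.List.pyGetD_eq_getElem _ 'A' hp0 (by rw [hblen]; exact_mod_cast hpk)]
  rw [List.getElem_take, List.getElem_drop]
  exact (List.getD_eq_getElem t ' ' (by omega)).symm

-- B's port reduced to the normal form
lemma pvPortB (text : String) (perm : List Int) (hne : perm ≠ [])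
    (hs : PySem.List.sorted perm (fun x => x) false = (List.range perm.length).map (fun n : Nat => (n : Int))) :
    permutation_encrypt_letters_only_alt text perm =
      String.ofList (pvCore (pvPadded text perm.length) perm perm.length
        ((pvPadded text perm.length).length / perm.length)) := by
  have hk : 0 < perm.length := List.length_pos_iff.mpr hne
  set k := perm.length with hkdef
  have hbound := pvPermBounds perm hs
  unfold permutation_encrypt_letters_only_alt
  simp only [List.map_id']
  rw [if_neg (fun hcon => hcon hs), if_neg (by omega)]
  rw [pvNegMod _ k hk, PySem.List.pyRepeat_singleton, Int.toNat_natCast, ← pvPadded]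
  set t := pvPadded text k with htdef
  have hdvd : k ∣ t.length := Nat.dvd_of_mod_eq_zero (pvPaddedDvd text k hk)
  set q := t.length / k with hqdef
  have hn : t.length = k * q := (Nat.mul_div_cancel' hdvd).symm
  congr 1
  rw [PySem.List.pyRange_one, Int.sub_zero, Int.toNat_natCast, List.map_map]
  rw [List.map_congr_left (g := fun j =>
      t.getD (k * (j / k) + (perm.getD (j % k) 0).toNat) ' ')
      (by
        intro j hj
        have hjn : j < t.length := List.mem_range.mp hj
        simp only [Function.comp_apply, Int.zero_add]
        rw [PySem.Int.mod_natCast, PySem.List.pyGetD_natCast]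
        have hpmem : perm.getD (j % k) 0 ∈ perm := by
          rw [List.getD_eq_getElem perm 0 (Nat.mod_lt _ hk)]
          exact List.getElem_mem (Nat.mod_lt _ hk)
        obtain ⟨hp0, hpk⟩ := hbound _ hpmem
        have hidx : ((j : Int) - ((j % k : Nat) : Int) + perm.getD (j % k) 0)
            = ((j - j % k + (perm.getD (j % k) 0).toNat : Nat) : Int) := by
          have hle : j % k ≤ j := Nat.mod_le _ _
          push_cast
          omega
        rw [hidx, PySem.List.pyGetD_natCast]
        have hdm := Nat.div_add_mod j k
        have : j - j % k = k * (j / k) := by omega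
        rw [this])]
  rw [hn, pvFlat (fun b r => t.getD (k * b + (perm.getD r 0).toNat) ' ') k hk q]
  rfl

-- ===== VERDICT (by name: the statement is the Claim_ definition above) =====
theorem permutation_encrypt_letters_only_spec : Claim_equal_permutation_encrypt_letters_only := by
  intro text perm _ hpre
  obtain ⟨hne, hs⟩ := hpre
  unfold Spec_permutation_encrypt_letters_only
  rw [pvPortA text perm hne hs, pvPortB text perm hne hs]
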